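-- pv_equiv track=rewrite | github.com/KHU-AIMS-LAB/Algorithm | 2023-Stage3/Week5/12996_ParkHW.py | function
-- ===== SOURCE A (Python) =====
-- dp = [[[[-1 for _ in range(51)] for _ in range(51)] for _ in range(51)] for _ in range(51)]
--
-- def function(S, a, b, c):
--     # 부를 곡이 모두 소진되었을 때 모든 사람의 할당량이 0인 경우만 결과 + 1
--     if S == 0:
--         if a == 0 and b == 0 and c == 0:
--             return 1
--         else:
--             return 0
--
--     # 한명이라도 음수가 되는 순간 그 재귀는 멈춤
--     if a < 0 or b < 0 or c < 0:
--         return 0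
--
--     # 빠른 계산을 위해 메모이제이션을 참고
--     # 계산된 적있는 값은 불러와서 사용
--     if dp[S][a][b][c] != -1:
--         return dp[S][a][b][c]
--
--     result = 0
--
--     # 곡 하나를 세 사람이 부를 수 있는 경우의 수는 총 7개
--     result += function(S - 1, a - 1, b, c)
--     result += function(S - 1, a, b - 1, c)
--     result += function(S - 1, a, b, c - 1)
--     result += function(S - 1, a - 1, b - 1, c)
--     result += function(S - 1, a - 1, b, c -1)
--     result += function(S - 1, a, b - 1, c - 1)
--     result += function(S - 1, a - 1, b - 1, c - 1)
--
--     result %= 1000000007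
--
--     # 메모이제이션
--     dp[S][a][b][c] = result
--     return result
-- ===== SOURCE B (Python) =====
-- MOD = 1000000007
--
-- def _comb(n, k):
--     # binomial coefficient C(n, k), 0 when k < 0 or k > n
--     if k < 0 or k > n:
--         return 0
--     r = 1
--     for i in range(k):
--         r = r * (n - i) // (i + 1)
--     return r
--
-- def function(S, a, b, c):
--     # impossible quotas: a negative quota, or fewer total sung slots than songs
--     # (every song needs at least one singer), give 0 without any work
--     if a < 0 or b < 0 or c < 0 or a + b + c < S:
--         return 0
--     # inclusion-exclusion over the j songs that nobody sings
--     total = 0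
--     for j in range(S + 1):
--         m = S - j
--         total += (-1) ** j * _comb(S, j) * _comb(m, a) * _comb(m, b) * _comb(m, c)
--     return total % MOD
-- ===== Notes on version B (the rewrite author's own statement) =====
-- stated objective: faster
-- what changed: Replaces the 7-way memoized recursion over (S,a,b,c) with a closed-form inclusion-exclusion sum over the number of unsung songs, sum_j (-1)^j C(S,j)C(S-j,a)C(S-j,b)C(S-j,c) mod 1e9+7, with binomials computed by a short product loop.
-- outside the precondition, e.g. on function(-1, 0, 0, 0): A returns 0, B returns 0; on function(-52, 0, 0, 0): A raises IndexError, B returns 0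
import Mathlib
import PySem

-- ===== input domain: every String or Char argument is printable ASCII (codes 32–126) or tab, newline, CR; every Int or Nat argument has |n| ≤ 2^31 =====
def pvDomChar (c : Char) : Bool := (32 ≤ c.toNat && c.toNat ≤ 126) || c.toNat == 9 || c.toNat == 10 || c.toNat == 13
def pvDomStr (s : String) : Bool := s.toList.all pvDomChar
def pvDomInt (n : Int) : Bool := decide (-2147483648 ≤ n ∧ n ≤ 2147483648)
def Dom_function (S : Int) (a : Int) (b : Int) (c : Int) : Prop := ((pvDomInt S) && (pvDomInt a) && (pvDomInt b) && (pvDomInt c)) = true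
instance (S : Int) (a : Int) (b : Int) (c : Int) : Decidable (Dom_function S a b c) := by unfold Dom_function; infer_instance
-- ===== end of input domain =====

-- B replaces A's 7-way memoized recursion by the inclusion-exclusion closed form
-- sum_j (-1)^j C(S,j)C(S-j,a)C(S-j,b)C(S-j,c) mod 1e9+7 (objective: faster).
-- A also mutates the module-level memo table dp; the equivalence proved here is about the return value only.


-- ===== PORT A =====
-- A's recursion on the song count as a Nat (Pre_ gives 0 ≤ S; the global memo table dp
-- only caches values this same recursion computes, so it is value-transparent and omitted).
def functionAuxA : Nat → Int → Int → Int → Int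
  | 0, a, b, c => if a = 0 ∧ b = 0 ∧ c = 0 then 1 else 0
  | S + 1, a, b, c =>
    if a < 0 ∨ b < 0 ∨ c < 0 then 0
    else
      PySem.Int.mod
        (functionAuxA S (a - 1) b c + functionAuxA S a (b - 1) c + functionAuxA S a b (c - 1) +
          functionAuxA S (a - 1) (b - 1) c + functionAuxA S (a - 1) b (c - 1) +
          functionAuxA S a (b - 1) (c - 1) + functionAuxA S (a - 1) (b - 1) (c - 1))
        1000000007

-- A's two leading branches, then the recursion; S < 0 (dp negative-index wraparound) is outside Pre_
def function (S : Int) (a : Int) (b : Int) (c : Int) : Int :=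
  if S = 0 then (if a = 0 ∧ b = 0 ∧ c = 0 then 1 else 0)
  else if a < 0 ∨ b < 0 ∨ c < 0 then 0
  else functionAuxA S.toNat a b c

-- ===== PORT B =====
-- Source B's _comb: iterative product r = r*(n-i)//(i+1)
def combAlt (n : Int) (k : Int) : Int :=
  if k < 0 ∨ n < k then 0
  else (List.range k.toNat).foldl
    (fun r (i : Nat) => PySem.Int.floordiv (r * (n - (i : Int))) ((i : Int) + 1)) 1

-- Source B's function: loop j in range(S+1) accumulating the inclusion-exclusion sum;
-- Python's (-1)**j with j ≥ 0 is (-1)^j.toNat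
def function_alt (S : Int) (a : Int) (b : Int) (c : Int) : Int :=
  if a < 0 ∨ b < 0 ∨ c < 0 ∨ a + b + c < S then 0
  else
  PySem.Int.mod
    ((PySem.List.pyRange 0 (S + 1) 1).foldl
      (fun total j =>
        total + (-1 : Int) ^ j.toNat * combAlt S j *
          (combAlt (S - j) a * combAlt (S - j) b * combAlt (S - j) c)) 0)
    1000000007

-- ===== PRECONDITION & SPEC =====
-- Pre_ excludes inputs where A raises IndexError (S outside [0,50] with all counts ≥ 0, or
-- 1 ≤ S ≤ 50 with all counts ≥ 0 and one of them > 50), and the remaining S < 0, all counts ≥ 0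
-- inputs: there A's value (0, when it does return) comes from negative-index wraparound into the
-- global memo table, which also pollutes the memo so that later calls become history-dependent —
-- an artefact of A's implementation.
def Pre_function (S : Int) (a : Int) (b : Int) (c : Int) : Prop :=
  (0 ≤ S ∧ S ≤ 50 ∧ (S = 0 ∨ a < 0 ∨ b < 0 ∨ c < 0 ∨ (a ≤ 50 ∧ b ≤ 50 ∧ c ≤ 50)))
  ∨ ((S < 0 ∨ 50 < S) ∧ (a < 0 ∨ b < 0 ∨ c < 0))
instance (S : Int) (a : Int) (b : Int) (c : Int) : Decidable (Pre_function S a b c) := by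
  unfold Pre_function; infer_instance

def pvWitness_function : Int × Int × Int × Int := (5, 2, 3, 4)

def Spec_function (S : Int) (a : Int) (b : Int) (c : Int) (out : Int) : Prop := out = function_alt S a b c
instance (S : Int) (a : Int) (b : Int) (c : Int) (out : Int) : Decidable (Spec_function S a b c out) := by unfold Spec_function; infer_instance

-- ===== CLAIM (what is proved, stated in full; the proofs are below) =====
def Claim_equal_function : Prop := ∀ (S : Int) (a : Int) (b : Int) (c : Int), Dom_function S a b c → Pre_function S a b c → Spec_function S a b c (function S a b c)

-- ===== LEMMAS AND PROOFS =====

-- mathematical binomial coefficient on Int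
def Cb (n k : Int) : Int := if 0 ≤ k ∧ k ≤ n then (n.toNat.choose k.toNat : Int) else 0

-- A's recursion without the running mod
def cnt : Nat → Int → Int → Int → Int
  | 0, a, b, c => if a = 0 ∧ b = 0 ∧ c = 0 then 1 else 0
  | S + 1, a, b, c =>
    if a < 0 ∨ b < 0 ∨ c < 0 then 0
    else
      cnt S (a - 1) b c + cnt S a (b - 1) c + cnt S a b (c - 1) +
        cnt S (a - 1) (b - 1) c + cnt S (a - 1) b (c - 1) +
        cnt S a (b - 1) (c - 1) + cnt S (a - 1) (b - 1) (c - 1)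

-- the inclusion-exclusion sum, as a Finset.range sum
def gsum (S : Nat) (a b c : Int) : Int :=
  ∑ j ∈ Finset.range (S + 1),
    (-1 : Int) ^ j * Cb (S : Int) (j : Int) *
      (Cb ((S : Int) - j) a * Cb ((S : Int) - j) b * Cb ((S : Int) - j) c)

theorem Cb_neg_left {n k : Int} (h : k < 0) : Cb n k = 0 := by
  simp [Cb]; omega

theorem Cb_gt {n k : Int} (h : n < k) : Cb n k = 0 := by
  simp [Cb]; intro h1; omega

theorem Cb_pascal (m k : Int) (hm : 0 ≤ m) : Cb (m + 1) k = Cb m k + Cb m (k - 1) := by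
  unfold Cb
  rcases lt_or_ge k 0 with hk | hk
  · rw [if_neg (by omega), if_neg (by omega), if_neg (by omega)]; ring
  rcases eq_or_lt_of_le hk with hk0 | hkpos
  · subst_vars
    rw [if_pos (by omega), if_pos (by omega), if_neg (by omega)]
    simp
  by_cases hle : k ≤ m
  · -- 1 ≤ k ≤ m
    rw [if_pos (by omega), if_pos (by omega), if_pos (by omega)]
    have h1 : (m + 1).toNat = m.toNat + 1 := by omega
    have h2 : k.toNat = (k - 1).toNat + 1 := by omega
    rw [h1, h2, Nat.choose_succ_succ]
    push_cast
    simp [Nat.succ_eq_add_one]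
    ring
  by_cases heq : k = m + 1
  · subst heq
    rw [if_pos (by omega), if_neg (by omega), if_pos (by omega)]
    have h1 : (m + 1).toNat = m.toNat + 1 := by omega
    have h3 : (m + 1 - 1).toNat = m.toNat := by omega
    rw [h1, h3]
    simp
  · rw [if_neg (by omega), if_neg (by omega), if_neg (by omega)]; ring

theorem combFold (n : Int) : ∀ K : Nat, (K : Int) ≤ n →
    (List.range K).foldl (fun r (i : Nat) => PySem.Int.floordiv (r * (n - (i : Int))) ((i : Int) + 1)) 1
      = (n.toNat.choose K : Int) := by
  intro K
  induction K with
  | zero => simp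
  | succ K ih =>
    intro hK
    rw [List.range_succ, List.foldl_append, ih (by omega)]
    simp only [List.foldl_cons, List.foldl_nil]
    rw [PySem.Int.floordiv_eq_ediv_of_pos (by omega)]
    have hsub : n - (K : Int) = ((n.toNat - K : Nat) : Int) := by omega
    have hch : n.toNat.choose (K + 1) * (K + 1) = n.toNat.choose K * (n.toNat - K) :=
      Nat.choose_succ_right_eq n.toNat K
    have hchZ : (n.toNat.choose (K + 1) : Int) * ((K : Int) + 1) = (n.toNat.choose K : Int) * ((n.toNat - K : Nat) : Int) := by
      exact_mod_cast hch
    have key : (n.toNat.choose K : Int) * (n - (K : Int)) = (n.toNat.choose (K + 1) : Int) * ((K : Int) + 1) := by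
      rw [hsub, hchZ]
    rw [key, Int.mul_ediv_cancel _ (by omega)]

theorem combAlt_eq_Cb (n k : Int) : combAlt n k = Cb n k := by
  unfold combAlt Cb
  by_cases h : k < 0 ∨ n < k
  · rw [if_pos h, if_neg (by omega)]
  · rw [if_neg h, if_pos (by omega), combFold n k.toNat (by omega)]

theorem functionAuxA_eq_mod (S : Nat) (a b c : Int) :
    functionAuxA S a b c = PySem.Int.mod (cnt S a b c) 1000000007 := by
  induction S generalizing a b c with
  | zero =>
    simp only [functionAuxA, cnt]
    rw [PySem.Int.mod_eq_emod_of_pos (by norm_num)]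
    split_ifs <;> decide
  | succ S ih =>
    simp only [functionAuxA, cnt]
    split_ifs with h
    · rw [PySem.Int.mod_eq_emod_of_pos (by norm_num)]
      simp
    · have me : ∀ x : Int, PySem.Int.mod x 1000000007 = x % 1000000007 :=
        fun x => PySem.Int.mod_eq_emod_of_pos (by norm_num)
      simp only [ih, me]
      have hmm : ∀ x : Int, Int.ModEq 1000000007 (x % 1000000007) x :=
        fun x => Int.emod_emod_of_dvd x dvd_rfl
      have h1 := hmm (cnt S (a - 1) b c)
      have h2 := hmm (cnt S a (b - 1) c)
      have h3 := hmm (cnt S a b (c - 1))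
      have h4 := hmm (cnt S (a - 1) (b - 1) c)
      have h5 := hmm (cnt S (a - 1) b (c - 1))
      have h6 := hmm (cnt S a (b - 1) (c - 1))
      have h7 := hmm (cnt S (a - 1) (b - 1) (c - 1))
      exact (((((h1.add h2).add h3).add h4).add h5).add h6).add h7

theorem gsum_zero (a b c : Int) :
    gsum 0 a b c = if a = 0 ∧ b = 0 ∧ c = 0 then 1 else 0 := by
  simp only [gsum]
  norm_num
  unfold Cb
  split_ifs <;> simp_all <;> omega

theorem gsum_neg {S : Nat} {a b c : Int} (h : a < 0 ∨ b < 0 ∨ c < 0) :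
    gsum S a b c = 0 := by
  apply Finset.sum_eq_zero
  intro j hj
  rcases h with h | h | h
  · rw [Cb_neg_left h]; ring
  · rw [Cb_neg_left h]; ring
  · rw [Cb_neg_left h]; ring

theorem gsum_succ (S : Nat) (a b c : Int) :
    gsum (S + 1) a b c =
      gsum S (a - 1) b c + gsum S a (b - 1) c + gsum S a b (c - 1) +
      gsum S (a - 1) (b - 1) c + gsum S (a - 1) b (c - 1) + gsum S a (b - 1) (c - 1) +
      gsum S (a - 1) (b - 1) (c - 1) := by
  have h1 : gsum (S + 1) a b c
      = (∑ j ∈ Finset.range (S + 2), (-1 : Int) ^ j * Cb (S : Int) (j : Int) *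
          (Cb ((S : Int) + 1 - j) a * Cb ((S : Int) + 1 - j) b * Cb ((S : Int) + 1 - j) c))
        + (∑ j ∈ Finset.range (S + 2), (-1 : Int) ^ j * Cb (S : Int) ((j : Int) - 1) *
          (Cb ((S : Int) + 1 - j) a * Cb ((S : Int) + 1 - j) b * Cb ((S : Int) + 1 - j) c)) := by
    rw [gsum, ← Finset.sum_add_distrib]
    apply Finset.sum_congr (by norm_num)
    intro j hj
    push_cast
    rw [Cb_pascal (S : Int) (j : Int) (Int.natCast_nonneg S)]
    ring
  have h2 : (∑ j ∈ Finset.range (S + 2), (-1 : Int) ^ j * Cb (S : Int) (j : Int) *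
          (Cb ((S : Int) + 1 - j) a * Cb ((S : Int) + 1 - j) b * Cb ((S : Int) + 1 - j) c))
      = ∑ j ∈ Finset.range (S + 1), (-1 : Int) ^ j * Cb (S : Int) (j : Int) *
          (Cb ((S : Int) + 1 - j) a * Cb ((S : Int) + 1 - j) b * Cb ((S : Int) + 1 - j) c) := by
    rw [Finset.sum_range_succ, Cb_gt (by push_cast; omega)]
    ring_nf
  have h3 : (∑ j ∈ Finset.range (S + 2), (-1 : Int) ^ j * Cb (S : Int) ((j : Int) - 1) *
          (Cb ((S : Int) + 1 - j) a * Cb ((S : Int) + 1 - j) b * Cb ((S : Int) + 1 - j) c))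
      = - gsum S a b c := by
    rw [Finset.sum_range_succ']
    rw [Cb_neg_left (by norm_num)]
    have hpt : ∀ i ∈ Finset.range (S + 1),
        (-1 : Int) ^ (i + 1) * Cb (S : Int) (((i + 1 : Nat) : Int) - 1) *
          (Cb ((S : Int) + 1 - ((i + 1 : Nat) : Int)) a * Cb ((S : Int) + 1 - ((i + 1 : Nat) : Int)) b *
           Cb ((S : Int) + 1 - ((i + 1 : Nat) : Int)) c)
        = -((-1 : Int) ^ i * Cb (S : Int) (i : Int) *
            (Cb ((S : Int) - i) a * Cb ((S : Int) - i) b * Cb ((S : Int) - i) c)) := by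
      intro i hi
      push_cast
      rw [pow_succ]
      ring_nf
    rw [Finset.sum_congr rfl hpt, gsum]
    simp [Finset.sum_neg_distrib]
  have h4 : (∑ j ∈ Finset.range (S + 1), (-1 : Int) ^ j * Cb (S : Int) (j : Int) *
          (Cb ((S : Int) + 1 - j) a * Cb ((S : Int) + 1 - j) b * Cb ((S : Int) + 1 - j) c))
      = gsum S (a - 1) b c + gsum S a (b - 1) c + gsum S a b (c - 1) +
        gsum S (a - 1) (b - 1) c + gsum S (a - 1) b (c - 1) + gsum S a (b - 1) (c - 1) +
        gsum S (a - 1) (b - 1) (c - 1) + gsum S a b c := by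
    have expand : ∀ j ∈ Finset.range (S + 1),
        (-1 : Int) ^ j * Cb (S : Int) (j : Int) *
          (Cb ((S : Int) + 1 - j) a * Cb ((S : Int) + 1 - j) b * Cb ((S : Int) + 1 - j) c)
        = (-1 : Int) ^ j * Cb (S : Int) (j : Int) * (Cb ((S : Int) - j) (a - 1) * Cb ((S : Int) - j) b * Cb ((S : Int) - j) c)
        + (-1 : Int) ^ j * Cb (S : Int) (j : Int) * (Cb ((S : Int) - j) a * Cb ((S : Int) - j) (b - 1) * Cb ((S : Int) - j) c)
        + (-1 : Int) ^ j * Cb (S : Int) (j : Int) * (Cb ((S : Int) - j) a * Cb ((S : Int) - j) b * Cb ((S : Int) - j) (c - 1))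
        + (-1 : Int) ^ j * Cb (S : Int) (j : Int) * (Cb ((S : Int) - j) (a - 1) * Cb ((S : Int) - j) (b - 1) * Cb ((S : Int) - j) c)
        + (-1 : Int) ^ j * Cb (S : Int) (j : Int) * (Cb ((S : Int) - j) (a - 1) * Cb ((S : Int) - j) b * Cb ((S : Int) - j) (c - 1))
        + (-1 : Int) ^ j * Cb (S : Int) (j : Int) * (Cb ((S : Int) - j) a * Cb ((S : Int) - j) (b - 1) * Cb ((S : Int) - j) (c - 1))
        + (-1 : Int) ^ j * Cb (S : Int) (j : Int) * (Cb ((S : Int) - j) (a - 1) * Cb ((S : Int) - j) (b - 1) * Cb ((S : Int) - j) (c - 1))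
        + (-1 : Int) ^ j * Cb (S : Int) (j : Int) * (Cb ((S : Int) - j) a * Cb ((S : Int) - j) b * Cb ((S : Int) - j) c) := by
      intro j hj
      have hj' : (j : Int) ≤ (S : Int) := by
        have := Finset.mem_range.mp hj; omega
      have hm : (0 : Int) ≤ (S : Int) - j := by omega
      have hrw : (S : Int) + 1 - (j : Int) = ((S : Int) - j) + 1 := by ring
      rw [hrw, Cb_pascal _ a hm, Cb_pascal _ b hm, Cb_pascal _ c hm]
      ring
    rw [Finset.sum_congr rfl expand]
    simp only [Finset.sum_add_distrib]
    rw [gsum, gsum, gsum, gsum, gsum, gsum, gsum, gsum]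
  rw [h1, h2, h3, h4]
  ring

theorem cnt_eq_gsum (S : Nat) (a b c : Int) : cnt S a b c = gsum S a b c := by
  induction S generalizing a b c with
  | zero => rw [gsum_zero]; rfl
  | succ S ih =>
    rw [gsum_succ]
    simp only [cnt]
    split_ifs with h
    · rw [gsum_neg, gsum_neg, gsum_neg, gsum_neg, gsum_neg, gsum_neg, gsum_neg] <;> [ring; omega; omega; omega; omega; omega; omega; omega]
    · simp only [ih]

theorem foldl_add_range (n : Nat) (f : Nat → Int) :
    (List.range n).foldl (fun t k => t + f k) 0 = ∑ j ∈ Finset.range n, f j := by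
  induction n with
  | zero => simp
  | succ n ih => rw [List.range_succ, List.foldl_append, Finset.sum_range_succ, ih]; simp

theorem cnt_slack (S : Nat) (a b c : Int) (h : a + b + c < (S : Int)) : cnt S a b c = 0 := by
  induction S generalizing a b c with
  | zero =>
    simp only [cnt, Nat.cast_zero] at h ⊢
    rw [if_neg]
    omega
  | succ S ih =>
    simp only [cnt]
    split_ifs with hneg
    · rfl
    · push_cast at h
      rw [ih _ _ _ (by omega), ih _ _ _ (by omega), ih _ _ _ (by omega), ih _ _ _ (by omega),
        ih _ _ _ (by omega), ih _ _ _ (by omega), ih _ _ _ (by omega)]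
      ring

theorem alt_sum (S a b c : Int) (hS : 0 ≤ S) :
    (PySem.List.pyRange 0 (S + 1) 1).foldl
      (fun total j =>
        total + (-1 : Int) ^ j.toNat * combAlt S j *
          (combAlt (S - j) a * combAlt (S - j) b * combAlt (S - j) c)) 0
    = gsum S.toNat a b c := by
  obtain ⟨n, rfl⟩ : ∃ n : Nat, S = (n : Int) := ⟨S.toNat, by omega⟩
  rw [PySem.List.pyRange_one, List.foldl_map]
  have hlen : ((n : Int) + 1 - 0).toNat = n + 1 := by omega
  rw [hlen]
  rw [foldl_add_range (n + 1) (fun k => (-1 : Int) ^ ((0 : Int) + (k : Int)).toNat * combAlt (n : Int) ((0 : Int) + (k : Int)) * (combAlt ((n : Int) - ((0 : Int) + (k : Int))) a * combAlt ((n : Int) - ((0 : Int) + (k : Int))) b * combAlt ((n : Int) - ((0 : Int) + (k : Int))) c))]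
  simp only [Int.toNat_natCast, zero_add, combAlt_eq_Cb]
  rw [gsum]

theorem alt_guard {S a b c : Int} (h : a < 0 ∨ b < 0 ∨ c < 0 ∨ a + b + c < S) :
    function_alt S a b c = 0 := by
  unfold function_alt
  rw [if_pos h]

theorem alt_eval (S a b c : Int) (hS : 0 ≤ S) (hg : ¬(a < 0 ∨ b < 0 ∨ c < 0 ∨ a + b + c < S)) :
    function_alt S a b c = PySem.Int.mod (gsum S.toNat a b c) 1000000007 := by
  unfold function_alt
  rw [if_neg hg, alt_sum S a b c hS]

-- ===== VERDICT (by name: the statement is the Claim_ definition above) =====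
theorem function_spec : Claim_equal_function := by
  intro S a b c _ hpre
  unfold Spec_function function
  by_cases hneg : a < 0 ∨ b < 0 ∨ c < 0
  · rw [alt_guard (by tauto)]
    rcases eq_or_ne S 0 with rfl | hz
    · rw [if_pos rfl, if_neg (by omega)]
    · rw [if_neg hz, if_pos hneg]
  · have hS : 0 ≤ S := by
      rcases hpre with ⟨hS, -, -⟩ | ⟨-, h⟩
      · exact hS
      · exact absurd h hneg
    by_cases hsl : a + b + c < S
    · have hz : S ≠ 0 := by omega
      rw [alt_guard (by tauto), if_neg hz, if_neg hneg, functionAuxA_eq_mod,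
        cnt_slack S.toNat a b c (by omega), PySem.Int.mod_eq_emod_of_pos (by norm_num)]
      simp
    · have hg : ¬(a < 0 ∨ b < 0 ∨ c < 0 ∨ a + b + c < S) := by omega
      rw [alt_eval S a b c hS hg]
      rcases eq_or_ne S 0 with rfl | hz
      · rw [if_pos rfl, show ((0 : Int)).toNat = 0 from rfl, gsum_zero,
          PySem.Int.mod_eq_emod_of_pos (by norm_num)]
        split_ifs <;> decide
      · rw [if_neg hz, if_neg hneg, functionAuxA_eq_mod, cnt_eq_gsum]
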